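-- pv_equiv track=rewrite | github.com/luoyangustc/argus | ataraxia/inference/ocr/sari/invoice-vat/src/postProcessDict.py | reviseFaPiaoHaoMa
-- ===== SOURCE A (Python) =====
-- def reviseFaPiaoHaoMa(input_dict):
--     '''
--     纠正识别后的字段
--     :param input_dict:待纠正的字段
--     :return:纠正发票号码印刷字段
--     '''
--     text = input_dict['_FaPiaoHaoMa_YinShua']
--     if text != None:
--         out = ''
--         for c in text:
--             if c>='0' and c<='9':
--                 out= out+c
--         input_dict['_FaPiaoHaoMa_YinShua'] = out
--     return input_dict
-- ===== SOURCE B (Python) =====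
-- def reviseFaPiaoHaoMa(input_dict):
--     text = input_dict['_FaPiaoHaoMa_YinShua']
--     if text is not None:
--         n = len(text)
--         parts = []
--         i = 0
--         while i < n:
--             if '0' <= text[i] <= '9':
--                 j = i + 1
--                 while j < n and '0' <= text[j] <= '9':
--                     j += 1
--                 parts.append(text[i:j])
--                 i = j
--             else:
--                 i += 1
--         input_dict['_FaPiaoHaoMa_YinShua'] = ''.join(parts)
--     return input_dict
-- ===== Notes on version B (the rewrite author's own statement) =====
-- stated objective: alternative
-- what changed: Instead of A's single character-by-character pass accumulating a string, B uses a two-pointer scan that locates each maximal digit run, copies it out with one slice text[i:j], collects the runs in a list, and joins them once at the end.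
import Mathlib
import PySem

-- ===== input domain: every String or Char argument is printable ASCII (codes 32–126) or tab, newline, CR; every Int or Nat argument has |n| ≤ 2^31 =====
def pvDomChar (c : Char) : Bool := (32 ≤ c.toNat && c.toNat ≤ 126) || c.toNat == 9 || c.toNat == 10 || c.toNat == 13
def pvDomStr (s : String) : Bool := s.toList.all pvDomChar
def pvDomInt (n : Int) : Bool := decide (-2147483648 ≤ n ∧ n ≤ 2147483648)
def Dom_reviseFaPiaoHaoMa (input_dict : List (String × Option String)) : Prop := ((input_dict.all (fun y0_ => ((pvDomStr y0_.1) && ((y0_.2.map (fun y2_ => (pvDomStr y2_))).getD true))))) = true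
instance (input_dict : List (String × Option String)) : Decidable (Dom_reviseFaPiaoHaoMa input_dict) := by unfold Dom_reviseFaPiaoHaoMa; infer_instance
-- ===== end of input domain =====

-- ===== PORT A =====
-- A mutates input_dict in place and returns it; the equivalence proved here is about the return value.
-- B replaces A's per-character accumulation pass by a two-pointer scan over maximal digit runs,
-- copying each run out with one slice and joining the runs at the end (alternative decomposition).
def reviseFaPiaoHaoMa (input_dict : List (String × Option String)) : List (String × Option String) :=
  let d := PySem.Dict.mk input_dict
  match d.get? "_FaPiaoHaoMa_YinShua" with
  | none => input_dict    -- KeyError in Python; excluded by Pre_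
  | some text? =>
    match text? with
    | none => input_dict  -- text == None: dict returned unchanged
    | some text =>
      let out := text.toList.foldl (fun out c => if '0' ≤ c && c ≤ '9' then out ++ [c] else out) []
      (d.insert "_FaPiaoHaoMa_YinShua" (some (String.ofList out))).items

-- ===== PORT B =====
def pvDig (c : Char) : Bool := decide ('0' ≤ c) && decide (c ≤ '9')

-- inner while: advance j while j < n and text[j] is a digit
def pvRunEnd (cs : List Char) (j : Nat) : Nat :=
  if j < cs.length ∧ pvDig (cs.getD j ' ') then pvRunEnd cs (j + 1) else j
termination_by cs.length - j
decreasing_by omega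

-- needed by pvParts's termination proof, so it stays above the port
theorem pvRunEnd_ge (cs : List Char) (j : Nat) : j ≤ pvRunEnd cs j := by
  fun_induction pvRunEnd cs j with
  | case1 j h ih => omega
  | case2 j h => omega

-- outer while: collect the maximal digit runs (text[i:j] with 0 ≤ i ≤ j is exactly (drop i).take (j-i))
def pvParts (cs : List Char) (i : Nat) : List (List Char) :=
  if h : i < cs.length then
    if pvDig (cs.getD i ' ') then
      let j := pvRunEnd cs (i + 1)
      ((cs.drop i).take (j - i)) :: pvParts cs j
    else pvParts cs (i + 1)
  else []
termination_by cs.length - i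
decreasing_by
  · have := pvRunEnd_ge cs (i + 1); omega
  · omega

def reviseFaPiaoHaoMa_alt (input_dict : List (String × Option String)) : List (String × Option String) :=
  let d := PySem.Dict.mk input_dict
  match d.get? "_FaPiaoHaoMa_YinShua" with
  | none => input_dict    -- KeyError in Python; excluded by Pre_
  | some text? =>
    match text? with
    | none => input_dict
    | some text =>
      (d.insert "_FaPiaoHaoMa_YinShua"
        (some (String.ofList (pvParts text.toList 0).flatten))).items

-- ===== PRECONDITION & SPEC =====
-- Pre_ excludes exactly the dicts without the key '_FaPiaoHaoMa_YinShua', on which both Pythons raise KeyError.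
def Pre_reviseFaPiaoHaoMa (input_dict : List (String × Option String)) : Prop :=
  "_FaPiaoHaoMa_YinShua" ∈ input_dict.map Prod.fst
instance (input_dict : List (String × Option String)) : Decidable (Pre_reviseFaPiaoHaoMa input_dict) := by unfold Pre_reviseFaPiaoHaoMa; infer_instance
def pvWitness_reviseFaPiaoHaoMa : (List (String × Option String)) := [("_FaPiaoHaoMa_YinShua", some "No.a1b2-34")]
def Spec_reviseFaPiaoHaoMa (input_dict : List (String × Option String)) (out : List (String × Option String)) : Prop := out = reviseFaPiaoHaoMa_alt input_dict
instance (input_dict : List (String × Option String)) (out : List (String × Option String)) : Decidable (Spec_reviseFaPiaoHaoMa input_dict out) := by unfold Spec_reviseFaPiaoHaoMa; infer_instance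

-- ===== CLAIM (what is proved, stated in full; the proofs are below) =====
def Claim_equal_reviseFaPiaoHaoMa : Prop := ∀ (input_dict : List (String × Option String)), Dom_reviseFaPiaoHaoMa input_dict → Pre_reviseFaPiaoHaoMa input_dict → Spec_reviseFaPiaoHaoMa input_dict (reviseFaPiaoHaoMa input_dict)

-- ===== LEMMAS AND PROOFS =====
theorem pvRunEnd_dig (cs : List Char) (j : Nat) :
    ∀ m, j ≤ m → m < pvRunEnd cs j → pvDig (cs.getD m ' ') = true := by
  fun_induction pvRunEnd cs j with
  | case1 j h ih =>
    intro m hm hm'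
    rcases Nat.eq_or_lt_of_le hm with rfl | h1
    · exact h.2
    · exact ih m h1 hm'
  | case2 j h => intro m hm hm'; omega

theorem pvParts_flatten (cs : List Char) (i : Nat) :
    (pvParts cs i).flatten = (cs.drop i).filter pvDig := by
  fun_induction pvParts cs i with
  | case1 i h hd j ih =>
    have hji : i + 1 ≤ j := pvRunEnd_ge cs (i + 1)
    -- every char of the run is a digit
    have hrun : ∀ a ∈ (cs.drop i).take (j - i), pvDig a = true := by
      intro a ha
      obtain ⟨m, hm, rfl⟩ := List.mem_iff_getElem.mp ha
      have hm1 : m < j - i := by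
        have := hm; simp [List.length_take] at this; omega
      have hlen : i + m < cs.length := by
        have := hm; simp [List.length_take, List.length_drop] at this; omega
      have : ((cs.drop i).take (j - i))[m] = cs[i + m]'hlen := by
        simp [List.getElem_take, List.getElem_drop]
      rw [this]
      rcases Nat.eq_zero_or_pos m with rfl | hpos
      · simp only [Nat.add_zero] at hlen ⊢
        rw [List.getD_eq_getElem _ _ hlen] at hd; exact hd
      · have hdm := pvRunEnd_dig cs (i + 1) (i + m) (by omega) (by omega)
        rw [List.getD_eq_getElem _ _ hlen] at hdm; exact hdm
    have hsplit : cs.drop i = (cs.drop i).take (j - i) ++ cs.drop j := by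
      have : cs.drop j = (cs.drop i).drop (j - i) := by
        rw [List.drop_drop]; congr 1; omega
      rw [this, List.take_append_drop]
    rw [List.flatten_cons, ih]
    conv_rhs => rw [hsplit]
    rw [List.filter_append, List.filter_eq_self.mpr hrun]
  | case2 i h hd ih =>
    have hdrop : cs.drop i = cs[i]'h :: cs.drop (i + 1) := List.drop_eq_getElem_cons h
    have hd' : pvDig (cs[i]'h) = false := by
      rw [List.getD_eq_getElem _ _ h] at hd; simpa using hd
    rw [ih, hdrop, List.filter_cons_of_neg (by simp [hd'])]
  | case3 i h =>
    have : cs.drop i = [] := List.drop_eq_nil_of_le (by omega)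
    simp [this]

theorem pv_foldl_filter (l acc : List Char) :
    l.foldl (fun out c => if '0' ≤ c ∧ c ≤ '9' then out ++ [c] else out) acc
      = acc ++ l.filter pvDig := by
  induction l generalizing acc with
  | nil => simp
  | cons c t ih =>
    by_cases h : '0' ≤ c ∧ c ≤ '9'
    · have hf : List.filter pvDig (c :: t) = c :: List.filter pvDig t :=
        List.filter_cons_of_pos (by simp [pvDig, h.1, h.2])
      simp [List.foldl_cons, if_pos h, ih, hf]
    · have hf : List.filter pvDig (c :: t) = List.filter pvDig t :=
        List.filter_cons_of_neg (by simpa [pvDig] using h)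
      simp [List.foldl_cons, if_neg h, ih, hf]

-- ===== VERDICT (by name: the statement is the Claim_ definition above) =====
theorem reviseFaPiaoHaoMa_spec : Claim_equal_reviseFaPiaoHaoMa := by
  intro input_dict _ _
  unfold Spec_reviseFaPiaoHaoMa reviseFaPiaoHaoMa reviseFaPiaoHaoMa_alt
  cases h : (PySem.Dict.mk input_dict).get? "_FaPiaoHaoMa_YinShua" with
  | none => simp [h]
  | some text? =>
    cases text? with
    | none => simp [h]
    | some text => simp [h, pv_foldl_filter, pvParts_flatten]
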